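-- pv_equiv track=rewrite | github.com/linjorejoy/full-python-projects | Tests/all_perm.py | get_all_dictionaries
-- ===== SOURCE A (Python) =====
-- def get_all_dictionaries(template:dict, variations: dict):
--
--     combinations = []
--
--
--     def combine(variations, combined_dict):
--
--         if len(variations.keys()) == 0:
--             return
--
--
--         if len(variations.keys()) == 1:
--             key = next(iter(variations))
--             for var in variations[key]:
--                 combined_dict_copy = combined_dict.copy()
--                 combined_dict_copy[key] = var
--                 combinations.append(combined_dict_copy)
--
--         key = next(iter(variations))
--         for var in variations[key]:
--             combined_dict_copy = combined_dict.copy()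
--             combined_dict_copy[key] = var
--             variations_copy = variations.copy()
--             del variations_copy[key]
--             combine(variations_copy, combined_dict_copy)
--
--
--     combine(variations, template)
--
--     return combinations
-- ===== SOURCE B (Python) =====
-- def get_all_dictionaries(template: dict, variations: dict):
--     # Iterative product: grow the result list one variation key at a time (BFS),
--     # instead of A's recursive key-peeling DFS with per-call dict copies.
--     if not variations:
--         return []
--     results = [dict(template)]
--     for key, vals in variations.items():
--         results = [{**d, key: v} for d in results for v in vals]
--     return results
-- ===== Notes on version B (the rewrite author's own statement) =====
-- stated objective: simpler
-- what changed: Replaces the recursive key-peeling DFS (which copies the variations dict and the partial result dict at every call) by a single iterative pass over the variation keys that grows a flat list of result dicts (breadth-first product).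
import Mathlib
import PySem

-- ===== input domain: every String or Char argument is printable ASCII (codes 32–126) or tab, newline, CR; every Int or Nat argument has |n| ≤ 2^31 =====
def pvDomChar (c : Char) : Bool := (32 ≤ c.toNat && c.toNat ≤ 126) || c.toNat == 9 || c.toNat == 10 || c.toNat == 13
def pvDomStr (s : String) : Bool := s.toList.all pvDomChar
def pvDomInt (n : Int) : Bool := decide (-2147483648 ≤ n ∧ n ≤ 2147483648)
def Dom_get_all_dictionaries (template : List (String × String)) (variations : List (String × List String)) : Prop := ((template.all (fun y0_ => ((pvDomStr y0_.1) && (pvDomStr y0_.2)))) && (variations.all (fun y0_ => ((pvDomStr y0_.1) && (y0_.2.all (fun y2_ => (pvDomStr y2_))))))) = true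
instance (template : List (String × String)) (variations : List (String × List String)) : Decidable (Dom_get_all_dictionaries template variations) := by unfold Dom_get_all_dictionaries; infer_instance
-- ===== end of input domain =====

-- B replaces A's recursive key-peeling DFS (with per-call dict copies) by one iterative
-- pass over the variation keys growing a flat list of result dicts (objective: simpler).

-- ===== PORT A =====
-- combine(variations, combined_dict): fuel = number of remaining keys (Python's recursion
-- removes one key per call, so 'size' fuel is exact). 'next(iter(variations))' is the first
-- item's key; 'variations[key]' is its value (first match). The shared 'combinations'
-- accumulator is returned in the same DFS append order.
def pvCombine : Nat → PySem.Dict String (List String) → PySem.Dict String String →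
    List (PySem.Dict String String)
  | 0, _, _ => []
  | n + 1, v, cd =>
    match v.items with
    | [] => []                                  -- len(variations.keys()) == 0: return
    | (key, vars) :: rest =>
      -- if len(variations.keys()) == 1: append combined_dict_copy for each var
      (if rest.length == 0 then vars.map (fun var => cd.insert key var) else [])
      -- then (unconditionally) recurse with key deleted, for each var
      ++ vars.flatMap (fun var => pvCombine n (v.erase key) (cd.insert key var))

def get_all_dictionaries (template : List (String × String)) (variations : List (String × List String)) : List (List (String × String)) :=
  let v := PySem.Dict.ofList variations
  (pvCombine v.size v (PySem.Dict.ofList template)).map (·.items)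

-- ===== PORT B =====
def get_all_dictionaries_alt (template : List (String × String)) (variations : List (String × List String)) : List (List (String × String)) :=
  let v := PySem.Dict.ofList variations
  if v.items.isEmpty then []
  else
    ((v.items.foldl
        (fun results kp => results.flatMap (fun d => kp.2.map (fun var => d.insert kp.1 var)))
        [PySem.Dict.ofList template]).map (·.items))

-- ===== PRECONDITION & SPEC =====
def Spec_get_all_dictionaries (template : List (String × String)) (variations : List (String × List String)) (out : List (List (String × String))) : Prop := out = get_all_dictionaries_alt template variations
instance (template : List (String × String)) (variations : List (String × List String)) (out : List (List (String × String))) : Decidable (Spec_get_all_dictionaries template variations out) := by unfold Spec_get_all_dictionaries; infer_instance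

-- ===== CLAIM (what is proved, stated in full; the proofs are below) =====
def Claim_equal_get_all_dictionaries : Prop := ∀ (template : List (String × String)) (variations : List (String × List String)), Dom_get_all_dictionaries template variations → Spec_get_all_dictionaries template variations (get_all_dictionaries template variations)

-- ===== LEMMAS AND PROOFS =====

-- B's step function on a list of partial results
def pvStep (results : List (PySem.Dict String String)) (kp : String × List String) :
    List (PySem.Dict String String) :=
  results.flatMap (fun d => kp.2.map (fun var => d.insert kp.1 var))

-- B's fold distributes over its list of partial results.
theorem pvStep_foldl_flatMap (l : List (String × List String))
    (res : List (PySem.Dict String String)) :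
    l.foldl pvStep res = res.flatMap (fun d => l.foldl pvStep [d]) := by
  induction l generalizing res with
  | nil => simp [List.foldl]
  | cons kp rest ih =>
    simp only [List.foldl_cons]
    rw [ih (pvStep res kp)]
    refine Eq.trans ?_ (List.flatMap_congr (fun d _ => (ih (pvStep [d] kp)).symm))
    simp [pvStep, List.flatMap_assoc]

-- Erasing the first key of a nodup-keyed dict drops exactly the head item.
theorem pvErase_head (key : String) (vars : List String)
    (rest : List (String × List String))
    (hnd : ((PySem.Dict.mk ((key, vars) :: rest) : PySem.Dict String (List String)).keys).Nodup) :
    (PySem.Dict.mk ((key, vars) :: rest) : PySem.Dict String (List String)).erase key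
      = PySem.Dict.mk rest := by
  simp only [PySem.Dict.keys, List.map_cons, List.nodup_cons, List.mem_map] at hnd
  simp only [PySem.Dict.erase, List.filter_cons, beq_self_eq_true, Bool.not_true]
  congr 1
  rw [if_neg (by simp)]
  rw [List.filter_eq_self]
  intro p hp
  simp only [Bool.not_eq_eq_eq_not, Bool.not_true, beq_eq_false_iff_ne, ne_eq]
  exact fun h => hnd.1 ⟨p, hp, h⟩

-- Main invariant: on a nonempty nodup-keyed item list, A's DFS equals B's fold.
theorem pvCombine_eq_foldl (l : List (String × List String))
    (cd : PySem.Dict String String)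
    (hnd : (l.map Prod.fst).Nodup) (hne : l ≠ []) :
    pvCombine l.length (PySem.Dict.mk l) cd = l.foldl pvStep [cd] := by
  induction l generalizing cd with
  | nil => exact absurd rfl hne
  | cons kp rest ih =>
    obtain ⟨key, vars⟩ := kp
    simp only [List.map_cons, List.nodup_cons] at hnd
    rw [show ((key, vars) :: rest).length = rest.length + 1 from rfl]
    simp only [pvCombine]
    rw [pvErase_head key vars rest
      (by simpa [PySem.Dict.keys, List.nodup_cons] using hnd)]
    cases rest with
    | nil =>
      simp [pvCombine, pvStep, List.foldl]
    | cons kp2 rest2 =>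
      have ih' := fun cd' => ih cd' hnd.2 (by simp)
      simp only [List.length_cons] at ih'
      rw [if_neg (by simp), List.nil_append]
      rw [List.foldl_cons, pvStep_foldl_flatMap]
      rw [show pvStep [cd] (key, vars) = vars.map (fun var => cd.insert key var) by
        simp [pvStep]]
      rw [List.flatMap_map]
      exact List.flatMap_congr (fun var _ => ih' (cd.insert key var))

-- A = B for any item list with nodup keys (covers both branches of B).
theorem pvMain (l : List (String × List String)) (t : PySem.Dict String String)
    (hnd : (l.map Prod.fst).Nodup) :
    (pvCombine (PySem.Dict.mk l : PySem.Dict String (List String)).size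
        (PySem.Dict.mk l : PySem.Dict String (List String)) t).map (·.items)
      = if ((PySem.Dict.mk l : PySem.Dict String (List String)).items).isEmpty then []
        else (((PySem.Dict.mk l : PySem.Dict String (List String)).items).foldl pvStep [t]).map
          (·.items) := by
  cases l with
  | nil => simp [pvCombine, PySem.Dict.size]
  | cons kp rest =>
    rw [if_neg (by simp)]
    rw [show (PySem.Dict.mk (kp :: rest) : PySem.Dict String (List String)).size
          = (kp :: rest).length from rfl]
    rw [pvCombine_eq_foldl (kp :: rest) t hnd (by simp)]

-- ===== VERDICT (by name: the statement is the Claim_ definition above) =====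
theorem get_all_dictionaries_spec : Claim_equal_get_all_dictionaries := by
  intro template variations _
  unfold Spec_get_all_dictionaries get_all_dictionaries get_all_dictionaries_alt
  have hnd : (((PySem.Dict.ofList variations :
      PySem.Dict String (List String)).items).map Prod.fst).Nodup := by
    simpa [PySem.Dict.keys] using
      PySem.Dict.nodup_keys_ofList (κ := String) (ν := List String) variations
  exact pvMain (PySem.Dict.ofList variations).items (PySem.Dict.ofList template) hnd
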